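-- pv_equiv track=rewrite | github.com/yeling/leetcode | leetcode6369.py | maximumOr2
-- ===== SOURCE A (Python) =====
-- from typing import List
--
-- def maximumOr2(nums: List[int], k: int) -> int:
--     ma = 0
--     index = -1
--     for i,v in enumerate(nums):
--         if v > ma:
--             ma = v
--             index = i
--     ans = 0
--     for i,v in enumerate(nums):
--         if i != index:
--             ans |= v
--     ans |= (ma << k)
--     return ans
-- ===== SOURCE B (Python) =====
-- from typing import List
--
-- def maximumOr2(nums: List[int], k: int) -> int:
--     # One fused pass: ma = running max (strict updates), restOr = OR of all
--     # elements seen so far EXCEPT the element that made ma what it is; when a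
--     # new max supersedes the old one, the old max is folded into restOr.
--     ma = 0
--     restOr = 0
--     for v in nums:
--         if v > ma:
--             restOr |= ma
--             ma = v
--         else:
--             restOr |= v
--     return restOr | (ma << k)
-- ===== Notes on version B (the rewrite author's own statement) =====
-- stated objective: alternative
-- what changed: A finds the max's index in one pass and then re-scans the list ORing every other position; B makes a single fused pass maintaining the invariant 'restOr = OR of everything except the current running max', folding each superseded max into restOr, so no index bookkeeping or second scan is needed.
import Mathlib
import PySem

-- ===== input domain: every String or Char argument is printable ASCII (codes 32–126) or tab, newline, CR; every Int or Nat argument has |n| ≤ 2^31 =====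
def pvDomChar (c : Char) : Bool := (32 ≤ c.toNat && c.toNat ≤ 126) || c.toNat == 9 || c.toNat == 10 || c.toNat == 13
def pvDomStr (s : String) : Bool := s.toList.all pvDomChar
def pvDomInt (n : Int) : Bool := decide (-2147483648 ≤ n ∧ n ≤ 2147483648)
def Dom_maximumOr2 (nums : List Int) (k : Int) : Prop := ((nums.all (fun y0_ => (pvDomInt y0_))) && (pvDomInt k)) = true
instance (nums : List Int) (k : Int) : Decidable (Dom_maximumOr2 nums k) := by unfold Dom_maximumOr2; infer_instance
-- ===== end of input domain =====

-- B replaces A's two passes (find the max's index, then re-scan ORing all other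
-- positions) by one fused pass carrying the invariant "restOr = OR of everything
-- seen except the current running max", folding each superseded max into restOr
-- (objective: alternative).

-- ===== PORT A =====
-- A's first loop: running max (strict >) and its index, seeded ma=0, index=-1
def pvPass1A : List Int → Int → Int → Int → Int × Int
  | [], _, ma, idx => (ma, idx)
  | v :: t, i, ma, idx => if v > ma then pvPass1A t (i + 1) v i else pvPass1A t (i + 1) ma idx

-- A's second loop: OR of the elements at positions ≠ idx
def pvPass2A : List Int → Int → Int → Int → Int
  | [], _, _, ans => ans
  | v :: t, i, idx, ans => pvPass2A t (i + 1) idx (if i ≠ idx then PySem.Int.bor ans v else ans)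

def maximumOr2 (nums : List Int) (k : Int) : Int :=
  PySem.Int.bor (pvPass2A nums 0 (pvPass1A nums 0 0 (-1)).2 0)
    ((pvPass1A nums 0 0 (-1)).1 <<< k.toNat)

-- ===== PORT B =====
-- B's single fused loop: (running max, OR of everything except the running max)
def pvLoopB : List Int → Int → Int → Int × Int
  | [], ma, restOr => (ma, restOr)
  | v :: t, ma, restOr =>
    if v > ma then pvLoopB t v (PySem.Int.bor restOr ma)
    else pvLoopB t ma (PySem.Int.bor restOr v)

def maximumOr2_alt (nums : List Int) (k : Int) : Int :=
  PySem.Int.bor (pvLoopB nums 0 0).2 ((pvLoopB nums 0 0).1 <<< k.toNat)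

-- ===== PRECONDITION & SPEC =====
-- Pre_ excludes k < 0, on which Python's `ma << k` raises ValueError.
def Pre_maximumOr2 (nums : List Int) (k : Int) : Prop := 0 ≤ k
instance (nums : List Int) (k : Int) : Decidable (Pre_maximumOr2 nums k) := by
  unfold Pre_maximumOr2; infer_instance
def pvWitness_maximumOr2 : List Int × Int := ([1, 2, 3], 1)

def Spec_maximumOr2 (nums : List Int) (k : Int) (out : Int) : Prop := out = maximumOr2_alt nums k
instance (nums : List Int) (k : Int) (out : Int) : Decidable (Spec_maximumOr2 nums k out) := by unfold Spec_maximumOr2; infer_instance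

-- ===== CLAIM (what is proved, stated in full; the proofs are below) =====
def Claim_equal_maximumOr2 : Prop := ∀ (nums : List Int) (k : Int), Dom_maximumOr2 nums k → Pre_maximumOr2 nums k → Spec_maximumOr2 nums k (maximumOr2 nums k)

-- ===== LEMMAS AND PROOFS =====

-- ---- bitwise-OR algebra: PySem.Int.bor is associative (not provided by PySem) ----

theorem natAndDivTwo (n m : ℕ) : (n &&& m) / 2 = n / 2 &&& m / 2 := by
  apply Nat.eq_of_testBit_eq
  intro k
  simp [Nat.testBit_div_two, Nat.testBit_and]

theorem natLdiffDivTwo (n m : ℕ) : (Nat.ldiff n m) / 2 = Nat.ldiff (n / 2) (m / 2) := by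
  apply Nat.eq_of_testBit_eq
  intro k
  simp [Nat.testBit_div_two, Nat.testBit_ldiff]

theorem natAndModTwo (n m : ℕ) : (n &&& m) % 2 = min (n % 2) (m % 2) := by
  have h := Nat.testBit_and n m 0
  simp only [Nat.testBit_zero] at h
  rcases Nat.mod_two_eq_zero_or_one n with h1 | h1 <;>
    rcases Nat.mod_two_eq_zero_or_one m with h2 | h2 <;>
      rcases Nat.mod_two_eq_zero_or_one (n &&& m) with h3 | h3 <;>
        rw [h1, h2, h3] at h ⊢ <;> revert h <;> decide

theorem natLdiffModTwo (n m : ℕ) : (Nat.ldiff n m) % 2 = n % 2 - min (n % 2) (m % 2) := by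
  have h := Nat.testBit_ldiff n m 0
  simp only [Nat.testBit_zero] at h
  rcases Nat.mod_two_eq_zero_or_one n with h1 | h1 <;>
    rcases Nat.mod_two_eq_zero_or_one m with h2 | h2 <;>
      rcases Nat.mod_two_eq_zero_or_one (Nat.ldiff n m) with h3 | h3 <;>
        rw [h1, h2, h3] at h ⊢ <;> revert h <;> decide

theorem natAndAddLdiff (n : ℕ) : ∀ m : ℕ, (n &&& m) + Nat.ldiff n m = n := by
  induction n using Nat.strong_induction_on with
  | _ n ih =>
    intro m
    rcases Nat.eq_zero_or_pos n with h0 | h0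
    · subst h0
      have e1 : (0 &&& m) = 0 := by simp
      have e2 : Nat.ldiff 0 m = 0 := by
        apply Nat.eq_of_testBit_eq; intro k; simp [Nat.testBit_ldiff]
      simp [e1, e2]
    · have hlt : n / 2 < n := Nat.div_lt_self h0 (by norm_num)
      have h1 := natAndDivTwo n m
      have h2 := natLdiffDivTwo n m
      have h3 := natAndModTwo n m
      have h4 := natLdiffModTwo n m
      have h5 := ih (n / 2) hlt (m / 2)
      have d1 := Nat.div_add_mod (n &&& m) 2
      have d2 := Nat.div_add_mod (Nat.ldiff n m) 2
      have d3 := Nat.div_add_mod n 2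
      omega

theorem natSubAndEqLdiff (n m : ℕ) : n - (n &&& m) = Nat.ldiff n m := by
  have := natAndAddLdiff n m
  omega

theorem intTestBitExt (x y : ℤ) (h : ∀ k, Int.testBit x k = Int.testBit y k) : x = y := by
  cases x with
  | ofNat m =>
    cases y with
    | ofNat n =>
      have : m = n := by
        apply Nat.eq_of_testBit_eq; intro k
        have := h k; simpa [Int.testBit] using this
      simp [this]
    | negSucc n =>
      exfalso
      have hk := h (m + n)
      have hm : Nat.testBit m (m + n) = false :=
        Nat.testBit_lt_two_pow (lt_of_lt_of_le (Nat.lt_two_pow_self) (Nat.pow_le_pow_right (by norm_num) (by omega)))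
      have hn : Nat.testBit n (m + n) = false :=
        Nat.testBit_lt_two_pow (lt_of_lt_of_le (Nat.lt_two_pow_self) (Nat.pow_le_pow_right (by norm_num) (by omega)))
      simp [Int.testBit, hm, hn] at hk
  | negSucc m =>
    cases y with
    | ofNat n =>
      exfalso
      have hk := h (m + n)
      have hm : Nat.testBit m (m + n) = false :=
        Nat.testBit_lt_two_pow (lt_of_lt_of_le (Nat.lt_two_pow_self) (Nat.pow_le_pow_right (by norm_num) (by omega)))
      have hn : Nat.testBit n (m + n) = false :=
        Nat.testBit_lt_two_pow (lt_of_lt_of_le (Nat.lt_two_pow_self) (Nat.pow_le_pow_right (by norm_num) (by omega)))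
      simp [Int.testBit, hm, hn] at hk
    | negSucc n =>
      have : m = n := by
        apply Nat.eq_of_testBit_eq; intro k
        have := h k
        simpa [Int.testBit] using this
      simp [this]

theorem intLorAssoc (a b c : ℤ) : Int.lor (Int.lor a b) c = Int.lor a (Int.lor b c) := by
  apply intTestBitExt
  intro k
  simp [Int.testBit_lor, Bool.or_assoc]

theorem borEqLor (a b : ℤ) : PySem.Int.bor a b = Int.lor a b := by
  cases a with
  | ofNat m =>
    cases b with
    | ofNat n => simp [PySem.Int.bor, Int.lor, Int.ofNat_eq_natCast]
    | negSucc n =>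
      have hb : ¬ (0 : ℤ) ≤ Int.negSucc n := by simp [Int.negSucc_eq]; omega
      have he : (-(Int.negSucc n) - 1).toNat = n := by simp [Int.negSucc_eq]
      simp only [PySem.Int.bor, Int.lor]
      rw [if_pos (by exact Int.natCast_nonneg m), if_neg hb, he]
      have ht : (Int.ofNat m).toNat = m := rfl
      rw [ht, natSubAndEqLdiff n m]
      simp [Int.negSucc_eq]
      omega
  | negSucc m =>
    cases b with
    | ofNat n =>
      have ha : ¬ (0 : ℤ) ≤ Int.negSucc m := by simp [Int.negSucc_eq]; omega
      have he : (-(Int.negSucc m) - 1).toNat = m := by simp [Int.negSucc_eq]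
      simp only [PySem.Int.bor, Int.lor]
      rw [if_neg ha, if_pos (by exact Int.natCast_nonneg n), he]
      have ht : (Int.ofNat n).toNat = n := rfl
      rw [ht, natSubAndEqLdiff m n]
      simp [Int.negSucc_eq]
      omega
    | negSucc n =>
      have ha : ¬ (0 : ℤ) ≤ Int.negSucc m := by simp [Int.negSucc_eq]; omega
      have hb : ¬ (0 : ℤ) ≤ Int.negSucc n := by simp [Int.negSucc_eq]; omega
      have hem : (-(Int.negSucc m) - 1).toNat = m := by simp [Int.negSucc_eq]
      have hen : (-(Int.negSucc n) - 1).toNat = n := by simp [Int.negSucc_eq]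
      simp only [PySem.Int.bor, Int.lor]
      rw [if_neg ha, if_neg hb, hem, hen]
      simp [Int.negSucc_eq]
      omega

theorem borAssoc (a b c : ℤ) :
    PySem.Int.bor (PySem.Int.bor a b) c = PySem.Int.bor a (PySem.Int.bor b c) := by
  rw [borEqLor, borEqLor, borEqLor, borEqLor, intLorAssoc]

theorem borLeftComm (a b c : ℤ) :
    PySem.Int.bor a (PySem.Int.bor b c) = PySem.Int.bor b (PySem.Int.bor a c) := by
  rw [← borAssoc, PySem.Int.bor_comm a b, borAssoc]

theorem zeroBor (a : ℤ) : PySem.Int.bor 0 a = a := by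
  rw [PySem.Int.bor_comm]; exact PySem.Int.bor_zero a

-- ---- loop lemmas ----

-- pulling the accumulator out of A's second loop
theorem pvPass2A_acc (t : List Int) : ∀ (i idx ans : Int),
    pvPass2A t i idx ans = PySem.Int.bor ans (pvPass2A t i idx 0) := by
  induction t with
  | nil => intro i idx ans; simp [pvPass2A, PySem.Int.bor_zero]
  | cons v t ih =>
    intro i idx ans
    simp only [pvPass2A]
    rw [ih, ih (i + 1) idx (if i ≠ idx then PySem.Int.bor 0 v else 0)]
    by_cases h : i ≠ idx <;>
      simp [h, zeroBor, borAssoc, borLeftComm, PySem.Int.bor_comm, PySem.Int.bor_zero]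

-- pulling the accumulator out of B's loop
theorem pvLoopB_acc (t : List Int) : ∀ (ma acc : Int),
    pvLoopB t ma acc = ((pvLoopB t ma 0).1, PySem.Int.bor acc (pvLoopB t ma 0).2) := by
  induction t with
  | nil => intro ma acc; simp [pvLoopB, PySem.Int.bor_zero]
  | cons v t ih =>
    intro ma acc
    simp only [pvLoopB]
    by_cases h : v > ma
    · simp only [h, if_pos]
      rw [ih v (PySem.Int.bor acc ma), ih v (PySem.Int.bor 0 ma)]
      simp only [Prod.mk.injEq, true_and]
      simp [zeroBor, borAssoc, borLeftComm, PySem.Int.bor_comm]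
    · simp only [h, if_neg, not_false_iff]
      rw [ih ma (PySem.Int.bor acc v), ih ma (PySem.Int.bor 0 v)]
      simp only [Prod.mk.injEq, true_and]
      simp [zeroBor, borAssoc, borLeftComm, PySem.Int.bor_comm]

-- the running maxima of the two loops agree
theorem pvMax_eq (t : List Int) : ∀ (i ma idx : Int),
    (pvPass1A t i ma idx).1 = (pvLoopB t ma 0).1 := by
  induction t with
  | nil => intro i ma idx; simp [pvPass1A, pvLoopB]
  | cons v t ih =>
    intro i ma idx
    simp only [pvPass1A, pvLoopB]
    by_cases h : v > ma
    · simp only [h, if_pos]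
      rw [pvLoopB_acc t v (PySem.Int.bor 0 ma)]
      exact ih (i + 1) v i
    · simp only [h, if_neg, not_false_iff]
      rw [pvLoopB_acc t ma (PySem.Int.bor 0 v)]
      exact ih (i + 1) ma idx

-- the index returned by A's first loop is the old one or ≥ the start position
theorem pvIdx_range (t : List Int) : ∀ (i ma idx : Int),
    (pvPass1A t i ma idx).2 = idx ∨ i ≤ (pvPass1A t i ma idx).2 := by
  induction t with
  | nil => intro i ma idx; simp [pvPass1A]
  | cons v t ih =>
    intro i ma idx
    simp only [pvPass1A]
    by_cases h : v > ma
    · simp only [h, if_pos]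
      rcases ih (i + 1) v i with h' | h' <;> right <;> omega
    · simp only [h, if_neg, not_false_iff]
      rcases ih (i + 1) ma idx with h' | h'
      · left; exact h'
      · right; omega

-- main invariant: B's restOr equals A's second-pass OR (final index excluded),
-- OR'd with the seed max when the seed max was superseded
theorem pvMain (t : List Int) : ∀ (i ma idx : Int), idx < i →
    (pvLoopB t ma 0).2 =
      PySem.Int.bor (pvPass2A t i (pvPass1A t i ma idx).2 0)
        (if (pvPass1A t i ma idx).2 = idx then 0 else ma) := by
  induction t with
  | nil =>
    intro i ma idx _
    simp [pvLoopB, pvPass1A, pvPass2A, PySem.Int.bor_zero]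
  | cons v t ih =>
    intro i ma idx hlt
    by_cases h : v > ma
    · have hpass1 : pvPass1A (v :: t) i ma idx = pvPass1A t (i + 1) v i := by
        simp [pvPass1A, h]
      have hloop : pvLoopB (v :: t) ma 0 = pvLoopB t v (PySem.Int.bor 0 ma) := by
        simp [pvLoopB, h]
      rw [hpass1, hloop]
      set j := (pvPass1A t (i + 1) v i).2 with hj
      have hji : j = i ∨ i + 1 ≤ j := pvIdx_range t (i + 1) v i
      have hjidx : ¬ (j = idx) := by omega
      have hpass2 : pvPass2A (v :: t) i j 0
          = pvPass2A t (i + 1) j (if i ≠ j then PySem.Int.bor 0 v else 0) := by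
        simp [pvPass2A]
      rw [hpass2, pvLoopB_acc t v (PySem.Int.bor 0 ma),
          pvPass2A_acc t (i + 1) j (if i ≠ j then PySem.Int.bor 0 v else 0),
          if_neg hjidx]
      rw [show (pvLoopB t v 0).2
            = PySem.Int.bor (pvPass2A t (i + 1) j 0)
                (if j = i then 0 else v) from ih (i + 1) v i (by omega)]
      rcases eq_or_ne j i with hji' | hji'
      · simp [hji', zeroBor, borAssoc, borLeftComm, PySem.Int.bor_comm, PySem.Int.bor_zero]
      · simp [hji', Ne.symm hji', zeroBor, borAssoc, borLeftComm, PySem.Int.bor_comm,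
          PySem.Int.bor_zero]
    · have hpass1 : pvPass1A (v :: t) i ma idx = pvPass1A t (i + 1) ma idx := by
        simp [pvPass1A, h]
      have hloop : pvLoopB (v :: t) ma 0 = pvLoopB t ma (PySem.Int.bor 0 v) := by
        simp [pvLoopB, h]
      rw [hpass1, hloop]
      set j := (pvPass1A t (i + 1) ma idx).2 with hj
      have hji : j = idx ∨ i + 1 ≤ j := pvIdx_range t (i + 1) ma idx
      have hij : i ≠ j := by omega
      have hpass2 : pvPass2A (v :: t) i j 0
          = pvPass2A t (i + 1) j (if i ≠ j then PySem.Int.bor 0 v else 0) := by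
        simp [pvPass2A]
      rw [hpass2, pvLoopB_acc t ma (PySem.Int.bor 0 v),
          pvPass2A_acc t (i + 1) j (if i ≠ j then PySem.Int.bor 0 v else 0),
          if_pos hij]
      rw [show (pvLoopB t ma 0).2
            = PySem.Int.bor (pvPass2A t (i + 1) j 0)
                (if j = idx then 0 else ma) from ih (i + 1) ma idx (by omega)]
      simp [zeroBor, borAssoc, borLeftComm, PySem.Int.bor_comm]

-- ===== VERDICT (by name: the statement is the Claim_ definition above) =====
theorem maximumOr2_spec : Claim_equal_maximumOr2 := by
  intro nums k _ _
  unfold Spec_maximumOr2 maximumOr2 maximumOr2_alt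
  rw [pvMax_eq nums 0 0 (-1), pvMain nums 0 0 (-1) (by norm_num)]
  rcases eq_or_ne (pvPass1A nums 0 0 (-1)).2 (-1) with hc | hc <;>
    simp [hc, PySem.Int.bor_zero]
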